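-- pv_equiv track=rewrite | github.com/FonziePants/adventofcode | 2023/day15/day15.py | hash_method
-- ===== SOURCE A (Python) =====
-- def hash_method(charset):
--     value = 0
--     for char in charset:
--         ascii = ord(char)
--         value += ascii
--         value *= 17
--         value %= 256
--     return value
-- ===== SOURCE B (Python) =====
-- def hash_method(charset):
--     total = 0
--     pow17 = 1
--     for char in reversed(charset):
--         pow17 = pow17 * 17 % 256
--         total += ord(char) * pow17
--     return total % 256
-- ===== Notes on version B (the rewrite author's own statement) =====
-- stated objective: alternative
-- what changed: Replaces the incremental Horner update ((value+ord)*17 % 256) by a reverse-order weighted sum: one pass over the characters back-to-front maintaining a running power of 17 mod 256 and accumulating ord(c)*17^k, with a single final mod.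
import Mathlib
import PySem

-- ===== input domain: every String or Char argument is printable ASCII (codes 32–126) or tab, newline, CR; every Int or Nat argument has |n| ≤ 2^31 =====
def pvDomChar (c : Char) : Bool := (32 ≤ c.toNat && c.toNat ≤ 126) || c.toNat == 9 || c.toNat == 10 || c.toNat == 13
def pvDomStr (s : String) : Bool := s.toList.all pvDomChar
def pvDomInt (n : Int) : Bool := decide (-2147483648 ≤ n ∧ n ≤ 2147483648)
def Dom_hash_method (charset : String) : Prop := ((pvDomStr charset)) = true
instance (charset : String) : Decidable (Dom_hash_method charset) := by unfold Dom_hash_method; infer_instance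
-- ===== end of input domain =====

-- Equivalence: A's Horner-style incremental hash vs B's reverse-pass weighted sum with a running power of 17 mod 256 (alternative decomposition, same cost).


-- ===== PORT A =====
-- for char in charset: value = ((value + ord(char)) * 17) % 256
def hash_method (charset : String) : Int :=
  charset.toList.foldl (fun value char => ((value + (char.toNat : Int)) * 17) % 256) 0

-- ===== PORT B =====
-- for char in reversed(charset): pow17 = pow17*17 % 256; total += ord(char)*pow17; return total % 256
def hash_method_alt (charset : String) : Int :=
  let st := charset.toList.reverse.foldl (fun (s : Int × Int) char =>
    let pow17 := s.2 * 17 % 256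
    (s.1 + (char.toNat : Int) * pow17, pow17)) (0, 1)
  st.1 % 256

-- ===== PRECONDITION & SPEC =====
def Spec_hash_method (charset : String) (out : Int) : Prop := out = hash_method_alt charset
instance (charset : String) (out : Int) : Decidable (Spec_hash_method charset out) := by unfold Spec_hash_method; infer_instance

-- ===== CLAIM (what is proved, stated in full; the proofs are below) =====
def Claim_equal_hash_method : Prop := ∀ (charset : String), Dom_hash_method charset → Spec_hash_method charset (hash_method charset)

-- ===== LEMMAS AND PROOFS =====

-- A's step, A's step without the mod, B's step, B's step without the mod
def stepA (v : Int) (c : Char) : Int := ((v + (c.toNat : Int)) * 17) % 256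
def stepP (v : Int) (c : Char) : Int := (v + (c.toNat : Int)) * 17
def stepB (s : Int × Int) (c : Char) : Int × Int :=
  let p := s.2 * 17 % 256
  (s.1 + (c.toNat : Int) * p, p)
def stepBP (s : Int × Int) (c : Char) : Int × Int :=
  let p := s.2 * 17
  (s.1 + (c.toNat : Int) * p, p)

lemma foldA_bound : ∀ (l : List Char) (v : Int), 0 ≤ v → v < 256 →
    0 ≤ l.foldl stepA v ∧ l.foldl stepA v < 256 := by
  intro l
  induction l with
  | nil => intro v h1 h2; exact ⟨h1, h2⟩
  | cons c l ih =>
    intro v _ _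
    exact ih _ (Int.emod_nonneg _ (by norm_num)) (Int.emod_lt_of_pos _ (by norm_num))

lemma foldA_mod : ∀ (l : List Char) (v w : Int), v ≡ w [ZMOD 256] →
    l.foldl stepA v ≡ l.foldl stepP w [ZMOD 256] := by
  intro l
  induction l with
  | nil => intro v w h; exact h
  | cons c l ih =>
    intro v w h
    apply ih
    have h1 : stepA v c ≡ (v + (c.toNat : Int)) * 17 [ZMOD 256] := Int.emod_emod_of_dvd _ dvd_rfl
    exact h1.trans ((h.add_right _).mul_right 17)

lemma foldB_mod : ∀ (r : List Char) (t t' p q : Int), t ≡ t' [ZMOD 256] → p ≡ q [ZMOD 256] →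
    (r.foldl stepB (t, p)).1 ≡ (r.foldl stepBP (t', q)).1 [ZMOD 256] ∧
    (r.foldl stepB (t, p)).2 ≡ (r.foldl stepBP (t', q)).2 [ZMOD 256] := by
  intro r
  induction r with
  | nil => intro t t' p q h1 h2; exact ⟨h1, h2⟩
  | cons c r ih =>
    intro t t' p q h1 h2
    apply ih
    · have hp : p * 17 % 256 ≡ q * 17 [ZMOD 256] :=
        (Int.emod_emod_of_dvd _ dvd_rfl).trans (h2.mul_right 17)
      exact h1.add (hp.mul_left _)
    · exact (Int.emod_emod_of_dvd _ dvd_rfl).trans (h2.mul_right 17)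

lemma foldP_shift : ∀ (l : List Char) (w : Int),
    l.foldl stepP w = w * 17 ^ l.length + l.foldl stepP 0 := by
  intro l
  induction l with
  | nil => simp
  | cons c l ih =>
    intro w
    show List.foldl stepP ((w + (c.toNat : Int)) * 17) l =
      w * 17 ^ (c :: l).length + List.foldl stepP ((0 + (c.toNat : Int)) * 17) l
    rw [ih ((w + (c.toNat : Int)) * 17), ih ((0 + (c.toNat : Int)) * 17)]
    simp [pow_succ]
    ring

lemma foldBP_reverse : ∀ (l : List Char) (t p : Int),
    l.reverse.foldl stepBP (t, p) = (t + p * l.foldl stepP 0, p * 17 ^ l.length) := by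
  intro l
  induction l with
  | nil => intro t p; simp
  | cons c l ih =>
    intro t p
    rw [List.reverse_cons, List.foldl_append, ih]
    show (t + p * List.foldl stepP 0 l + (c.toNat : Int) * (p * 17 ^ l.length * 17),
          p * 17 ^ l.length * 17) =
      (t + p * List.foldl stepP ((0 + (c.toNat : Int)) * 17) l, p * 17 ^ (c :: l).length)
    rw [foldP_shift l ((0 + (c.toNat : Int)) * 17)]
    simp only [Prod.mk.injEq, List.length_cons, pow_succ]
    constructor <;> ring

-- ===== VERDICT (by name: the statement is the Claim_ definition above) =====
theorem hash_method_spec : Claim_equal_hash_method := by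
  intro charset _
  unfold Spec_hash_method hash_method hash_method_alt
  set l := charset.toList with hl
  have hA : l.foldl stepA 0 ≡ l.foldl stepP 0 [ZMOD 256] := foldA_mod l 0 0 Int.ModEq.rfl
  have hB : (l.reverse.foldl stepB (0, 1)).1 ≡ (l.reverse.foldl stepBP (0, 1)).1 [ZMOD 256] :=
    (foldB_mod l.reverse 0 0 1 1 Int.ModEq.rfl Int.ModEq.rfl).1
  have hBP : (l.reverse.foldl stepBP ((0 : Int), (1 : Int))).1 = l.foldl stepP 0 := by
    rw [foldBP_reverse]; ring
  have hbound := foldA_bound l 0 (le_refl 0) (by norm_num)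
  have hmod : (l.reverse.foldl stepB (0, 1)).1 % 256 = l.foldl stepA 0 % 256 := by
    have : (l.reverse.foldl stepB (0, 1)).1 ≡ l.foldl stepA 0 [ZMOD 256] :=
      (hB.trans (hBP ▸ Int.ModEq.rfl)).trans hA.symm
    exact this
  show l.foldl stepA 0 = (l.reverse.foldl stepB (0, 1)).1 % 256
  rw [hmod, Int.emod_eq_of_lt hbound.1 hbound.2]
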